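-- pv_equiv track=rewrite | github.com/sandesh-argon/atlas | archive/legacy/v2.0/phaseA/A3_conditional_independence/scripts/validate_prepruning_loss.py | categorize_edge
-- ===== SOURCE A (Python) =====
-- def categorize_edge(source, target):
--     """
--     Infer domain from variable name
--     Simple heuristic based on common keywords
--     """
--     domains = {
--         'Economic': ['gdp', 'gni', 'income', 'trade', 'export', 'import', 'tax', 'debt', 'investment', 'fdi'],
--         'Health': ['health', 'life_expectancy', 'mortality', 'disease', 'nutrition', 'malnutrition', 'hospital', 'physician'],
--         'Education': ['education', 'school', 'literacy', 'enrollment', 'teacher', 'university'],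
--         'Governance': ['government', 'democracy', 'corruption', 'rule_of_law', 'political', 'civil_liberties'],
--         'Environment': ['co2', 'emission', 'renewable', 'forest', 'energy', 'climate'],
--         'Social': ['population', 'urban', 'rural', 'employment', 'unemployment', 'poverty', 'inequality', 'gini']
--     }
--
--     source_lower = source.lower()
--     target_lower = target.lower()
--
--     source_domain = 'Other'
--     target_domain = 'Other'
--
--     for domain, keywords in domains.items():
--         if any(kw in source_lower for kw in keywords):
--             source_domain = domain
--         if any(kw in target_lower for kw in keywords):
--             target_domain = domain
--
--     return source_domain, target_domain
-- ===== SOURCE B (Python) =====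
-- _DOMAIN_TABLE = [
--     ('Economic', ['gdp', 'gni', 'income', 'trade', 'export', 'import', 'tax', 'debt', 'investment', 'fdi']),
--     ('Health', ['health', 'life_expectancy', 'mortality', 'disease', 'nutrition', 'malnutrition', 'hospital', 'physician']),
--     ('Education', ['education', 'school', 'literacy', 'enrollment', 'teacher', 'university']),
--     ('Governance', ['government', 'democracy', 'corruption', 'rule_of_law', 'political', 'civil_liberties']),
--     ('Environment', ['co2', 'emission', 'renewable', 'forest', 'energy', 'climate']),
--     ('Social', ['population', 'urban', 'rural', 'employment', 'unemployment', 'poverty', 'inequality', 'gini']),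
-- ]
--
-- _DOMS = [dom for dom, _ in _DOMAIN_TABLE]
--
-- # flat keyword -> rank (index of its domain); built once
-- _KW_RANK = {kw: i for i, (_, kws) in enumerate(_DOMAIN_TABLE) for kw in kws}
--
--
-- def _classify(name):
--     low = name.lower()
--     best = max((r for kw, r in _KW_RANK.items() if kw in low), default=-1)
--     return _DOMS[best] if best >= 0 else 'Other'
--
--
-- def categorize_edge(source, target):
--     return _classify(source), _classify(target)
-- ===== Notes on version B (the rewrite author's own statement) =====
-- stated objective: alternative
-- what changed: Replaced the shared loop over grouped domain keyword lists that overwrites source_domain/target_domain at every later matching domain with a flat keyword->rank dictionary built once: each name is classified independently by taking the maximum rank among its matched keywords and indexing the domain list (max-rank selection == last-domain-wins overwrite).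
import Mathlib
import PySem

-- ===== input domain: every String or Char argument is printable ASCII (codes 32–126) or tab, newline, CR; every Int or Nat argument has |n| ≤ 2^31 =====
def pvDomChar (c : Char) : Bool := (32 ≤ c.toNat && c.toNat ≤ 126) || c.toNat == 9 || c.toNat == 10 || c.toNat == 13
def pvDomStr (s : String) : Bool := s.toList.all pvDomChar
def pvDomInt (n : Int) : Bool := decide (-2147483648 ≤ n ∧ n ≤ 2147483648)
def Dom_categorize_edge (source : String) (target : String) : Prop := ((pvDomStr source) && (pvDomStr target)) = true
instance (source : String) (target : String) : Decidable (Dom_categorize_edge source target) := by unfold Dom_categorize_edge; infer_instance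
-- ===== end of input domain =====

-- B replaces A's shared overwrite loop over grouped keyword lists with a flat keyword->rank map
-- and max-rank selection per endpoint (alternative decomposition; same values).

-- ===== PORT A =====
def pvTableA : List (String × List String) :=
  [("Economic", ["gdp", "gni", "income", "trade", "export", "import", "tax", "debt", "investment", "fdi"]),
   ("Health", ["health", "life_expectancy", "mortality", "disease", "nutrition", "malnutrition", "hospital", "physician"]),
   ("Education", ["education", "school", "literacy", "enrollment", "teacher", "university"]),
   ("Governance", ["government", "democracy", "corruption", "rule_of_law", "political", "civil_liberties"]),
   ("Environment", ["co2", "emission", "renewable", "forest", "energy", "climate"]),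
   ("Social", ["population", "urban", "rural", "employment", "unemployment", "poverty", "inequality", "gini"])]

def categorize_edge (source : String) (target : String) : String × String :=
  let source_lower := PySem.Str.lower source
  let target_lower := PySem.Str.lower target
  pvTableA.foldl
    (fun st p =>
      let sd := if p.2.any (fun kw => PySem.Str.isIn kw source_lower) then p.1 else st.1
      let td := if p.2.any (fun kw => PySem.Str.isIn kw target_lower) then p.1 else st.2
      (sd, td))
    ("Other", "Other")

-- ===== PORT B =====
def pvTableB : List (String × List String) :=
  [("Economic", ["gdp", "gni", "income", "trade", "export", "import", "tax", "debt", "investment", "fdi"]),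
   ("Health", ["health", "life_expectancy", "mortality", "disease", "nutrition", "malnutrition", "hospital", "physician"]),
   ("Education", ["education", "school", "literacy", "enrollment", "teacher", "university"]),
   ("Governance", ["government", "democracy", "corruption", "rule_of_law", "political", "civil_liberties"]),
   ("Environment", ["co2", "emission", "renewable", "forest", "energy", "climate"]),
   ("Social", ["population", "urban", "rural", "employment", "unemployment", "poverty", "inequality", "gini"])]

def pvNames : List String := pvTableB.map (fun p => p.1)

-- flat keyword -> rank association list ({kw: i for i,(_,kws) in enumerate(...) for kw in kws})
def pvKwRank : List (String × Int) :=
  (pvTableB.zipIdx).flatMap (fun p => p.1.2.map (fun kw => (kw, (p.2 : Int))))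

-- max((r for kw,r in _KW_RANK.items() if kw in low), default=-1)
def pvBest (low : String) : Int :=
  pvKwRank.foldl (fun b p => if PySem.Str.isIn p.1 low then max b p.2 else b) (-1)

def pvClassify (name : String) : String :=
  let low := PySem.Str.lower name
  let best := pvBest low
  if 0 ≤ best then (PySem.List.pyGet? pvNames best).getD "Other" else "Other"

def categorize_edge_alt (source : String) (target : String) : String × String :=
  (pvClassify source, pvClassify target)

-- ===== PRECONDITION & SPEC =====
def Spec_categorize_edge (source : String) (target : String) (out : String × String) : Prop := out = categorize_edge_alt source target
instance (source : String) (target : String) (out : String × String) : Decidable (Spec_categorize_edge source target out) := by unfold Spec_categorize_edge; infer_instance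

-- ===== CLAIM (what is proved, stated in full; the proofs are below) =====
def Claim_equal_categorize_edge : Prop := ∀ (source : String) (target : String), Dom_categorize_edge source target → Spec_categorize_edge source target (categorize_edge source target)

-- ===== LEMMAS AND PROOFS =====

-- what B's final lookup computes from a best-rank value
def pvLk (b : Int) : String :=
  if 0 ≤ b then (PySem.List.pyGet? pvNames b).getD "Other" else "Other"

-- folding the max-step over a constant-rank keyword group collapses to one conditional max
theorem pv_foldl_const_rank (low : String) (kws : List String) (r b : Int) :
    (kws.map (fun kw => (kw, r))).foldl
      (fun b p => if PySem.Str.isIn p.1 low then max b p.2 else b) b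
    = if kws.any (fun kw => PySem.Str.isIn kw low) then max b r else b := by
  induction kws generalizing b with
  | nil => simp
  | cons k ks ih =>
    rw [List.map_cons, List.foldl_cons, List.any_cons]
    by_cases h : PySem.Str.isIn k low = true
    · rw [if_pos h, ih, h, Bool.true_or, if_pos rfl]
      cases hany : ks.any (fun kw => PySem.Str.isIn kw low) <;>
        simp [max_assoc]
    · rw [if_neg h, ih]
      rw [Bool.not_eq_true] at h
      rw [h, Bool.false_or]

-- one domain step: A's overwrite and B's conditional max stay in correspondence
theorem pv_step (c : Bool) (d s : String) (i b : Int)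
    (hb : b < i) (hd : (PySem.List.pyGet? pvNames i).getD "Other" = d)
    (hi : 0 ≤ i) (hs : s = pvLk b) :
    ((if c then d else s) = pvLk (if c then max b i else b)
      ∧ (if c then max b i else b) < i + 1) := by
  cases c
  · exact ⟨by simpa using hs, by simpa using by omega⟩
  · refine ⟨?_, by simp [max_le_iff]; omega⟩
    have hm : max b i = i := max_eq_right (le_of_lt hb)
    simp [hm, pvLk, hi, hd]

-- the six chained steps, with the group-match bits abstracted
theorem pv_chain (c0 c1 c2 c3 c4 c5 : Bool) :
    (if c5 then "Social" else if c4 then "Environment" else if c3 then "Governance"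
      else if c2 then "Education" else if c1 then "Health" else if c0 then "Economic" else "Other")
    = pvLk (if c5 then max (if c4 then max (if c3 then max (if c2 then max
        (if c1 then max (if c0 then max (-1) 0 else (-1)) 1 else if c0 then max (-1) 0 else (-1)) 2
        else if c1 then max (if c0 then max (-1) 0 else (-1)) 1 else if c0 then max (-1) 0 else (-1)) 3
        else if c2 then max (if c1 then max (if c0 then max (-1) 0 else (-1)) 1 else if c0 then max (-1) 0 else (-1)) 2
        else if c1 then max (if c0 then max (-1) 0 else (-1)) 1 else if c0 then max (-1) 0 else (-1)) 4
        else if c3 then max (if c2 then max (if c1 then max (if c0 then max (-1) 0 else (-1)) 1 else if c0 then max (-1) 0 else (-1)) 2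
        else if c1 then max (if c0 then max (-1) 0 else (-1)) 1 else if c0 then max (-1) 0 else (-1)) 3
        else if c2 then max (if c1 then max (if c0 then max (-1) 0 else (-1)) 1 else if c0 then max (-1) 0 else (-1)) 2
        else if c1 then max (if c0 then max (-1) 0 else (-1)) 1 else if c0 then max (-1) 0 else (-1)) 5
        else if c4 then max (if c3 then max (if c2 then max (if c1 then max (if c0 then max (-1) 0 else (-1)) 1 else if c0 then max (-1) 0 else (-1)) 2
        else if c1 then max (if c0 then max (-1) 0 else (-1)) 1 else if c0 then max (-1) 0 else (-1)) 3
        else if c2 then max (if c1 then max (if c0 then max (-1) 0 else (-1)) 1 else if c0 then max (-1) 0 else (-1)) 2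
        else if c1 then max (if c0 then max (-1) 0 else (-1)) 1 else if c0 then max (-1) 0 else (-1)) 4
        else if c3 then max (if c2 then max (if c1 then max (if c0 then max (-1) 0 else (-1)) 1 else if c0 then max (-1) 0 else (-1)) 2
        else if c1 then max (if c0 then max (-1) 0 else (-1)) 1 else if c0 then max (-1) 0 else (-1)) 3
        else if c2 then max (if c1 then max (if c0 then max (-1) 0 else (-1)) 1 else if c0 then max (-1) 0 else (-1)) 2
        else if c1 then max (if c0 then max (-1) 0 else (-1)) 1 else if c0 then max (-1) 0 else (-1)) := by
  obtain ⟨e0, l0⟩ := pv_step c0 "Economic" "Other" 0 (-1) (by norm_num) rfl (by norm_num) (by simp [pvLk])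
  obtain ⟨e1, l1⟩ := pv_step c1 "Health" _ 1 _ l0 rfl (by norm_num) e0
  obtain ⟨e2, l2⟩ := pv_step c2 "Education" _ 2 _ l1 rfl (by norm_num) e1
  obtain ⟨e3, l3⟩ := pv_step c3 "Governance" _ 3 _ l2 rfl (by norm_num) e2
  obtain ⟨e4, l4⟩ := pv_step c4 "Environment" _ 4 _ l3 rfl (by norm_num) e3
  obtain ⟨e5, _⟩ := pv_step c5 "Social" _ 5 _ l4 rfl (by norm_num) e4
  exact e5

-- the single-endpoint version of A's fold
def pvFoldA1 (low : String) : String :=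
  pvTableA.foldl (fun st p => if p.2.any (fun kw => PySem.Str.isIn kw low) then p.1 else st) "Other"

theorem pv_side (name : String) : pvFoldA1 (PySem.Str.lower name) = pvClassify name := by
  unfold pvClassify pvBest pvFoldA1
  have hkw : pvKwRank =
      (["gdp", "gni", "income", "trade", "export", "import", "tax", "debt", "investment", "fdi"].map (fun kw => (kw, (0 : Int))))
      ++ (["health", "life_expectancy", "mortality", "disease", "nutrition", "malnutrition", "hospital", "physician"].map (fun kw => (kw, (1 : Int))))
      ++ (["education", "school", "literacy", "enrollment", "teacher", "university"].map (fun kw => (kw, (2 : Int))))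
      ++ (["government", "democracy", "corruption", "rule_of_law", "political", "civil_liberties"].map (fun kw => (kw, (3 : Int))))
      ++ (["co2", "emission", "renewable", "forest", "energy", "climate"].map (fun kw => (kw, (4 : Int))))
      ++ (["population", "urban", "rural", "employment", "unemployment", "poverty", "inequality", "gini"].map (fun kw => (kw, (5 : Int)))) := by
    simp [pvKwRank, pvTableB, List.zipIdx, List.flatMap]
  rw [hkw]
  simp only [List.foldl_append, pv_foldl_const_rank, pvTableA, List.foldl_cons, List.foldl_nil]
  exact pv_chain
    (List.any _ (fun kw => PySem.Str.isIn kw (PySem.Str.lower name)))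
    (List.any _ (fun kw => PySem.Str.isIn kw (PySem.Str.lower name)))
    (List.any _ (fun kw => PySem.Str.isIn kw (PySem.Str.lower name)))
    (List.any _ (fun kw => PySem.Str.isIn kw (PySem.Str.lower name)))
    (List.any _ (fun kw => PySem.Str.isIn kw (PySem.Str.lower name)))
    (List.any _ (fun kw => PySem.Str.isIn kw (PySem.Str.lower name)))

-- A's shared fold is the pair of the two independent single-endpoint folds
theorem pv_pair (source target : String) :
    categorize_edge source target
      = (pvFoldA1 (PySem.Str.lower source), pvFoldA1 (PySem.Str.lower target)) := by
  simp only [categorize_edge, pvFoldA1, pvTableA, List.foldl_cons, List.foldl_nil]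

-- ===== VERDICT (by name: the statement is the Claim_ definition above) =====
theorem categorize_edge_spec : Claim_equal_categorize_edge := by
  intro source target _
  unfold Spec_categorize_edge categorize_edge_alt
  rw [pv_pair, pv_side, pv_side]
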